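-- pv_equiv track=rewrite | github.com/RobbyLankford/python | mit/6.1010/recitation/week-01/midpoint/question-03.py | best_movie
-- ===== SOURCE A (Python) =====
-- def best_movie(movies, ratings):
--     best_rating = ratings[0]
--     for rating in ratings:
--         if rating > best_rating:
--             best_rating = rating
--
--     best_movie = movies[0]
--     for i in range(len(movies)):
--         if ratings[i] == best_rating:
--             best_movie = movies[i]
--
--     return best_movie
-- ===== SOURCE B (Python) =====
-- def best_movie(movies, ratings):
--     best_r = ratings[0]
--     best_m = movies[0]
--     for m, r in zip(movies, ratings):
--         if r >= best_r:
--             best_r, best_m = r, m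
--     return best_m
-- ===== Notes on version B (the rewrite author's own statement) =====
-- stated objective: simpler
-- what changed: Fuses A's two staged passes (a running-max loop over ratings, then a separate forward last-match scan by index) into one single pass over zip(movies, ratings) that tracks the best rating and best movie together, updating on >= so the last maximum wins; no precomputed maximum and no index arithmetic remain.
-- intended difference: On inputs where ratings is longer than movies and the unpaired tail holds a strictly larger rating than every movie-paired rating, A returns movies[0] (its globally computed maximum matches no movie index) while B returns the last movie with the highest paired rating, which is the intended best listed movie. — e.g. on best_movie(["a", "b"], [1, 2, 5]): A returns "a", B returns "b"
import Mathlib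
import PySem

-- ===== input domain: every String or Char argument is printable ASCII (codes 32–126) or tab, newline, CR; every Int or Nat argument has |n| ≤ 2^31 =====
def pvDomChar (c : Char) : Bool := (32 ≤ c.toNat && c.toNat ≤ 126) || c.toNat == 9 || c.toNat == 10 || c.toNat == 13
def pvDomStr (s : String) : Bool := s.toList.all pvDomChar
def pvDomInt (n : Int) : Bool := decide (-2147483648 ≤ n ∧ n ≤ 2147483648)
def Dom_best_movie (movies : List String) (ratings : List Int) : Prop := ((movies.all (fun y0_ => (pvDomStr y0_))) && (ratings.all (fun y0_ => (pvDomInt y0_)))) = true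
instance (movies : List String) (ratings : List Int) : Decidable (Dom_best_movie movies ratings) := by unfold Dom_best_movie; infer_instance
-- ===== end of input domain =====

-- B fuses A's two staged passes into one loop over zip(movies, ratings) tracking best rating and best movie together (simpler); on the D_ inputs (ratings longer than movies with the strict maximum only in the unpaired tail, and the last best-paired movie not movies[0]) A falls back to movies[0] while B returns the best paired movie.


-- ===== PORT A =====
-- ratings[0] / movies[0] / ratings[i] are total here via headD/getD; Pre_ keeps us where Python does not raise.
def best_movie (movies : List String) (ratings : List Int) : String :=
  let best_rating := ratings.foldl (fun b r => if b < r then r else b) (ratings.headD 0)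
  (List.range movies.length).foldl
    (fun bm i => if ratings[i]?.getD 0 == best_rating then movies[i]?.getD "" else bm)
    (movies.headD "")

-- ===== PORT B =====
-- one fused pass over zip(movies, ratings); state = (best rating, best movie), updated when r >= best rating
def best_movie_alt (movies : List String) (ratings : List Int) : String :=
  ((movies.zip ratings).foldl
    (fun s p => if s.1 ≤ p.2 then (p.2, p.1) else s)
    (ratings.headD 0, movies.headD "")).2

-- ===== PRECONDITION & SPEC =====
-- Pre_: exactly where Python A returns normally (movies nonempty and every movie index valid in ratings);
-- elsewhere A raises IndexError.
def Pre_best_movie (movies : List String) (ratings : List Int) : Prop :=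
  movies ≠ [] ∧ movies.length ≤ ratings.length
instance (movies : List String) (ratings : List Int) : Decidable (Pre_best_movie movies ratings) := by unfold Pre_best_movie; infer_instance
def pvWitness_best_movie : List String × List Int := (["a", "b"], [1, 2])

-- On inputs where ratings is longer than movies, the unpaired tail holds a strictly larger rating than every
-- movie-paired rating, and the last movie with the highest paired rating is not the string movies[0], A returns
-- movies[0] (its globally computed maximum matches no movie index) while B returns that last best-paired movie,
-- which is the intended best listed movie.
def D_best_movie (movies : List String) (ratings : List Int) : Prop :=
  movies.length < ratings.length ∧
    (ratings.take movies.length).foldl max (ratings.headD 0) < ratings.foldl max (ratings.headD 0) ∧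
    ∃ i ∈ List.range movies.length,
      ratings[i]?.getD 0 = (ratings.take movies.length).foldl max (ratings.headD 0) ∧
      movies[i]?.getD "" ≠ movies.headD "" ∧
      ∀ j ∈ List.range movies.length, i < j →
        ratings[j]?.getD 0 < (ratings.take movies.length).foldl max (ratings.headD 0)
instance (movies : List String) (ratings : List Int) : Decidable (D_best_movie movies ratings) := by unfold D_best_movie; infer_instance

def Spec_best_movie (movies : List String) (ratings : List Int) (out : String) : Prop := ¬ D_best_movie movies ratings → out = best_movie_alt movies ratings
instance (movies : List String) (ratings : List Int) (out : String) : Decidable (Spec_best_movie movies ratings out) := by unfold Spec_best_movie; infer_instance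

def pvDiffWitness_best_movie : List String × List Int := (["a", "b"], [1, 2, 5])
def pvDiffWitnessOut_best_movie : String × String := ("a", "b")

-- ===== CLAIM (what is proved, stated in full; the proofs are below) =====
def Claim_unchanged_best_movie : Prop := ∀ (movies : List String) (ratings : List Int), Dom_best_movie movies ratings → Pre_best_movie movies ratings → Spec_best_movie movies ratings (best_movie movies ratings)
def Claim_changed_best_movie : Prop := Dom_best_movie (pvDiffWitness_best_movie.1) (pvDiffWitness_best_movie.2) ∧ Pre_best_movie (pvDiffWitness_best_movie.1) (pvDiffWitness_best_movie.2) ∧ D_best_movie (pvDiffWitness_best_movie.1) (pvDiffWitness_best_movie.2) ∧ best_movie (pvDiffWitness_best_movie.1) (pvDiffWitness_best_movie.2) = pvDiffWitnessOut_best_movie.1 ∧ best_movie_alt (pvDiffWitness_best_movie.1) (pvDiffWitness_best_movie.2) = pvDiffWitnessOut_best_movie.2 ∧ pvDiffWitnessOut_best_movie.1 ≠ pvDiffWitnessOut_best_movie.2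
def Claim_exact_best_movie : Prop := ∀ (movies : List String) (ratings : List Int), Dom_best_movie movies ratings → Pre_best_movie movies ratings → D_best_movie movies ratings → best_movie movies ratings ≠ best_movie_alt movies ratings

-- ===== LEMMAS AND PROOFS =====

-- A's running-max update is Int.max
theorem pv_step_eq_max : (fun (b r : Int) => if b < r then r else b) = max := by
  funext b r
  rcases lt_or_ge b r with h | h
  · simp [h, max_eq_right h.le]
  · simp [not_lt.mpr h, max_eq_left h]

theorem pv_le_foldl_max (l : List Int) (b : Int) : b ≤ l.foldl max b := by
  induction l generalizing b with
  | nil => simp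
  | cons x t ih => exact le_trans (le_max_left b x) (ih (max b x))

theorem pv_mem_le_foldl_max (l : List Int) (x : Int) (hx : x ∈ l) :
    ∀ b : Int, x ≤ l.foldl max b := by
  induction l with
  | nil => simp at hx
  | cons y t ih =>
      intro b
      rcases List.mem_cons.mp hx with h | h
      · subst h; exact le_trans (le_max_right b x) (pv_le_foldl_max t (max b x))
      · exact ih h (max b y)

theorem pv_take_foldl_max_le (l : List Int) (n : Nat) (b : Int) :
    (l.take n).foldl max b ≤ l.foldl max b := by
  conv_rhs => rw [← List.take_append_drop n l]
  rw [List.foldl_append]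
  exact pv_le_foldl_max _ _

theorem pv_foldl_max_attained (l : List Int) :
    ∀ b : Int, l.foldl max b = b ∨ l.foldl max b ∈ l := by
  induction l with
  | nil => intro b; left; rfl
  | cons x t ih =>
      intro b
      rw [List.foldl_cons]
      rcases ih (max b x) with h | h
      · rw [h]
        rcases max_choice b x with hb | hb
        · left; exact hb
        · right; rw [hb]; exact List.mem_cons_self
      · right; exact List.mem_cons_of_mem x h

-- the fused fold returns (total max, last element whose rating reaches that max)
theorem pv_fused (l : List (String × Int)) (b : Int) (bm : String) :
    l.foldl (fun s p => if s.1 ≤ p.2 then (p.2, p.1) else s) (b, bm)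
      = (l.foldl (fun a p => max a p.2) b,
         l.foldl (fun x p => if l.foldl (fun a q => max a q.2) b ≤ p.2 then p.1 else x) bm) := by
  induction l using List.reverseRecOn with
  | nil => simp
  | append_singleton t p ih =>
      rw [List.foldl_append, List.foldl_append, List.foldl_append, ih]
      simp only [List.foldl_cons, List.foldl_nil]
      by_cases h : t.foldl (fun a q => max a q.2) b ≤ p.2
      · have hM : max (t.foldl (fun a q => max a q.2) b) p.2 = p.2 := max_eq_right h
        simp [h]
      · have hM : max (t.foldl (fun a q => max a q.2) b) p.2 = t.foldl (fun a q => max a q.2) b :=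
          max_eq_left (lt_of_not_ge h).le
        simp only [hM, if_neg h]

-- range-indexed map reconstructs the zip
theorem pv_map_range_zip (movies : List String) (ratings : List Int)
    (h : movies.length ≤ ratings.length) :
    (List.range movies.length).map (fun i => (movies[i]?.getD "", ratings[i]?.getD 0))
      = movies.zip ratings := by
  apply List.ext_getElem
  · simp [h]
  · intro i h1 h2
    have hm : i < movies.length := by simpa using h1
    have hr : i < ratings.length := by omega
    simp [List.getElem_zip, hm, hr]

-- the zip's second-component max is the max over the movie-paired prefix of ratings
theorem pv_zip_max (movies : List String) (ratings : List Int)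
    (h : movies.length ≤ ratings.length) (b : Int) :
    (movies.zip ratings).foldl (fun a p => max a p.2) b
      = (ratings.take movies.length).foldl max b := by
  have hsnd : (movies.zip ratings).map Prod.snd = ratings.take movies.length := by
    apply List.ext_getElem
    · simp [h]
    · intro i h1 h2
      simp [List.getElem_zip]
  conv_rhs => rw [← hsnd]
  rw [List.foldl_map]

-- a "keep the last match" fold over range n is a backward find?
theorem pv_fold_eq_revfind (p : Nat → Prop) [DecidablePred p] (g : Nat → String) (n : Nat) (a0 : String) :
    (List.range n).foldl (fun bm i => if p i then g i else bm) a0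
      = (match (List.range n).reverse.find? (fun i => decide (p i)) with
         | some i => g i
         | none => a0) := by
  induction n with
  | zero => simp
  | succ n ih =>
      rw [List.range_succ, List.foldl_append, List.reverse_append]
      simp only [List.foldl_cons, List.foldl_nil, List.reverse_cons, List.reverse_nil,
        List.nil_append, List.cons_append, List.find?]
      by_cases hp : p n
      · simp [hp]
      · simp [hp, ih]

theorem pv_revfind_none (p : Nat → Prop) [DecidablePred p] :
    ∀ n : Nat, (∀ i, i < n → ¬ p i) →
      (List.range n).reverse.find? (fun i => decide (p i)) = none := by
  intro n
  induction n with
  | zero => intro _; simp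
  | succ n ih =>
      intro h
      rw [List.range_succ, List.reverse_append]
      simp only [List.reverse_cons, List.reverse_nil, List.nil_append, List.cons_append, List.find?]
      have hn : ¬ p n := h n (Nat.lt_succ_self n)
      simp [hn, ih (fun i hi => h i (Nat.lt_succ_of_lt hi))]

theorem pv_revfind_last (p : Nat → Prop) [DecidablePred p] (i : Nat) (hp : p i) :
    ∀ n : Nat, i < n → (∀ j, i < j → j < n → ¬ p j) →
      (List.range n).reverse.find? (fun i => decide (p i)) = some i := by
  intro n
  induction n with
  | zero => intro h _; omega
  | succ n ih =>
      intro hi hl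
      rw [List.range_succ, List.reverse_append]
      simp only [List.reverse_cons, List.reverse_nil, List.nil_append, List.cons_append, List.find?]
      by_cases hin : i = n
      · subst hin; simp [hp]
      · have hn : ¬ p n := hl n (by omega) (Nat.lt_succ_self n)
        simp only [hn, decide_false]
        exact ih (by omega) (fun j hj1 hj2 => hl j hj1 (Nat.lt_succ_of_lt hj2))

theorem pv_revfind_congr (p q : Nat → Prop) [DecidablePred p] [DecidablePred q] :
    ∀ n : Nat, (∀ i, i < n → (p i ↔ q i)) →
      (List.range n).reverse.find? (fun i => decide (p i))
        = (List.range n).reverse.find? (fun i => decide (q i)) := by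
  intro n
  induction n with
  | zero => intro _; simp
  | succ n ih =>
      intro h
      rw [List.range_succ, List.reverse_append]
      simp only [List.reverse_cons, List.reverse_nil, List.nil_append, List.cons_append, List.find?]
      have hn := h n (Nat.lt_succ_self n)
      by_cases hp : p n
      · simp [hp, hn.mp hp]
      · have hq : ¬ q n := fun hq => hp (hn.mpr hq)
        simp only [hp, hq, decide_false]
        exact ih (fun i hi => h i (Nat.lt_succ_of_lt hi))

-- index bound: every movie-paired rating is at most the paired-prefix max
theorem pv_idx_le_take_max (m0 : String) (ms : List String) (r0 : Int) (rs : List Int)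
    (hlen : (m0 :: ms).length ≤ (r0 :: rs).length) (i : Nat) (hi : i < (m0 :: ms).length) :
    (r0 :: rs)[i]?.getD 0 ≤ ((r0 :: rs).take (m0 :: ms).length).foldl max r0 := by
  have hr : i < (r0 :: rs).length := by omega
  have htl : i < ((r0 :: rs).take (m0 :: ms).length).length := by
    rw [List.length_take]; omega
  have hval : (r0 :: rs)[i]?.getD 0 = ((r0 :: rs).take (m0 :: ms).length)[i] := by
    rw [List.getElem?_eq_getElem hr]
    simp only [Option.getD_some]
    exact List.getElem_take.symm
  rw [hval]
  exact pv_mem_le_foldl_max _ _ (List.getElem_mem htl) r0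

-- B is the last movie holding the paired-prefix maximum (index form)
theorem pv_B_range (m0 : String) (ms : List String) (r0 : Int) (rs : List Int)
    (hlen : (m0 :: ms).length ≤ (r0 :: rs).length) :
    best_movie_alt (m0 :: ms) (r0 :: rs)
      = (List.range (m0 :: ms).length).foldl
          (fun x i => if ((r0 :: rs).take (m0 :: ms).length).foldl max r0 ≤ (r0 :: rs)[i]?.getD 0
                      then (m0 :: ms)[i]?.getD "" else x)
          m0 := by
  unfold best_movie_alt
  simp only [List.headD_cons]
  rw [pv_fused, pv_zip_max (m0 :: ms) (r0 :: rs) hlen r0]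
  rw [← pv_map_range_zip (m0 :: ms) (r0 :: rs) hlen, List.foldl_map]

-- the paired-prefix max is attained at some movie index
theorem pv_take_max_attained (m0 : String) (ms : List String) (r0 : Int) (rs : List Int)
    (hlen : (m0 :: ms).length ≤ (r0 :: rs).length) :
    ∃ i, i < (m0 :: ms).length ∧
      (r0 :: rs)[i]?.getD 0 = ((r0 :: rs).take (m0 :: ms).length).foldl max r0 := by
  rcases pv_foldl_max_attained ((r0 :: rs).take (m0 :: ms).length) r0 with h | h
  · refine ⟨0, by simp, ?_⟩
    rw [h]; rfl
  · rcases List.mem_iff_getElem.mp h with ⟨i, hi, hv⟩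
    have hi' : i < (m0 :: ms).length := by
      rw [List.length_take] at hi; omega
    have hr : i < (r0 :: rs).length := by omega
    refine ⟨i, hi', ?_⟩
    rw [List.getElem?_eq_getElem hr]
    simp only [Option.getD_some]
    rw [← hv]
    exact List.getElem_take.symm

-- ===== VERDICT (by name: the statement is the Claim_ definition above) =====
theorem best_movie_spec : Claim_unchanged_best_movie := by
  intro movies ratings _ hpre
  obtain ⟨hm, hlen⟩ := hpre
  intro hnd
  rcases movies with _ | ⟨m0, ms⟩
  · exact absurd rfl hm
  rcases ratings with _ | ⟨r0, rs⟩
  · simp at hlen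
  have hMtle : ((r0 :: rs).take (m0 :: ms).length).foldl max r0 ≤ (r0 :: rs).foldl max r0 :=
    pv_take_foldl_max_le _ _ _
  rw [pv_B_range m0 ms r0 rs hlen]
  unfold best_movie
  rw [pv_step_eq_max]
  simp only [List.headD_cons, beq_iff_eq]
  refine Eq.trans
    (pv_fold_eq_revfind (fun i => (r0 :: rs)[i]?.getD 0 = (r0 :: rs).foldl max r0)
      (fun i => (m0 :: ms)[i]?.getD "") (m0 :: ms).length m0)
    (Eq.trans ?_
      (pv_fold_eq_revfind (fun i => ((r0 :: rs).take (m0 :: ms).length).foldl max r0 ≤ (r0 :: rs)[i]?.getD 0)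
        (fun i => (m0 :: ms)[i]?.getD "") (m0 :: ms).length m0).symm)
  by_cases hMM : ((r0 :: rs).take (m0 :: ms).length).foldl max r0 = (r0 :: rs).foldl max r0
  · rw [pv_revfind_congr
      (fun i => (r0 :: rs)[i]?.getD 0 = (r0 :: rs).foldl max r0)
      (fun i => ((r0 :: rs).take (m0 :: ms).length).foldl max r0 ≤ (r0 :: rs)[i]?.getD 0)
      (m0 :: ms).length
      (fun i hi => by
        have hle := pv_idx_le_take_max m0 ms r0 rs hlen i hi
        constructor
        · intro h; omega
        · intro h; omega)]
  · -- paired-prefix max strictly below the global max: A finds no match and keeps movies[0]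
    have hMt : ((r0 :: rs).take (m0 :: ms).length).foldl max r0 < (r0 :: rs).foldl max r0 := by
      omega
    have hltlen : (m0 :: ms).length < (r0 :: rs).length := by
      rcases lt_or_eq_of_le hlen with h | h
      · exact h
      · exfalso; rw [h, List.take_length] at hMt; omega
    rw [pv_revfind_none (fun i => (r0 :: rs)[i]?.getD 0 = (r0 :: rs).foldl max r0)
      (m0 :: ms).length (fun i hi h => by
        have hle := pv_idx_le_take_max m0 ms r0 rs hlen i hi
        omega)]
    -- B picks the last index attaining the paired-prefix max; outside D_ its movie is movies[0]
    obtain ⟨i0, hi0, hv0⟩ := pv_take_max_attained m0 ms r0 rs hlen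
    have hstar := Nat.findGreatest_spec (m := i0)
      (n := ms.length)
      (P := fun i => (r0 :: rs)[i]?.getD 0 = ((r0 :: rs).take (m0 :: ms).length).foldl max r0)
      (by simp at hi0; omega) hv0
    have hlast : ∀ j, Nat.findGreatest (fun i => (r0 :: rs)[i]?.getD 0 = ((r0 :: rs).take (m0 :: ms).length).foldl max r0) ms.length < j →
        j < (m0 :: ms).length →
        (r0 :: rs)[j]?.getD 0 < ((r0 :: rs).take (m0 :: ms).length).foldl max r0 := by
      intro j hj1 hj2
      have hne := Nat.findGreatest_is_greatest hj1 (by simp at hj2; omega)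
      have hle := pv_idx_le_take_max m0 ms r0 rs hlen j hj2
      rcases lt_or_eq_of_le hle with h | h
      · exact h
      · exact absurd h hne
    have hstarlt : Nat.findGreatest (fun i => (r0 :: rs)[i]?.getD 0 = ((r0 :: rs).take (m0 :: ms).length).foldl max r0) ms.length < (m0 :: ms).length :=
      Nat.lt_succ_of_le (Nat.findGreatest_le ms.length)
    rw [pv_revfind_last
      (fun i => ((r0 :: rs).take (m0 :: ms).length).foldl max r0 ≤ (r0 :: rs)[i]?.getD 0)
      (Nat.findGreatest (fun i => (r0 :: rs)[i]?.getD 0 = ((r0 :: rs).take (m0 :: ms).length).foldl max r0) ms.length)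
      (le_of_eq hstar.symm) (m0 :: ms).length hstarlt
      (fun j hj1 hj2 h => absurd h (not_le_of_gt (hlast j hj1 hj2)))]
    -- ¬ D_ forces that movie to be movies[0]
    by_contra hne
    refine hnd ⟨hltlen, by simpa using hMt, Nat.findGreatest _ ms.length,
      List.mem_range.mpr hstarlt, by simpa using hstar, fun h => hne ?_,
      fun j hj hij => by simpa using hlast j hij (List.mem_range.mp hj)⟩
    simpa using h.symm

theorem best_movie_changed : Claim_changed_best_movie := by
  unfold Claim_changed_best_movie; decide

theorem best_movie_tight : Claim_exact_best_movie := by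
  intro movies ratings _ hpre hd
  obtain ⟨hm, hlen⟩ := hpre
  rcases movies with _ | ⟨m0, ms⟩
  · exact absurd rfl hm
  rcases ratings with _ | ⟨r0, rs⟩
  · simp at hlen
  obtain ⟨hlt, hMt, i, hi, hri, hmne, hlastD⟩ := hd
  simp only [List.headD_cons] at hMt hri hlastD hmne
  have hiN : i < (m0 :: ms).length := List.mem_range.mp hi
  -- A = movies[0]
  have hA : best_movie (m0 :: ms) (r0 :: rs) = m0 := by
    unfold best_movie
    rw [pv_step_eq_max]
    simp only [List.headD_cons, beq_iff_eq]
    refine Eq.trans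
      (pv_fold_eq_revfind (fun i => (r0 :: rs)[i]?.getD 0 = (r0 :: rs).foldl max r0)
        (fun i => (m0 :: ms)[i]?.getD "") (m0 :: ms).length m0) ?_
    rw [pv_revfind_none (fun i => (r0 :: rs)[i]?.getD 0 = (r0 :: rs).foldl max r0)
      (m0 :: ms).length (fun j hj h => by
        have hle := pv_idx_le_take_max m0 ms r0 rs hlen j hj
        omega)]
  -- B = movies[i]: i is the last index attaining the paired-prefix max
  have hB : best_movie_alt (m0 :: ms) (r0 :: rs) = (m0 :: ms)[i]?.getD "" := by
    rw [pv_B_range m0 ms r0 rs hlen]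
    refine Eq.trans
      (pv_fold_eq_revfind (fun j => ((r0 :: rs).take (m0 :: ms).length).foldl max r0 ≤ (r0 :: rs)[j]?.getD 0)
        (fun j => (m0 :: ms)[j]?.getD "") (m0 :: ms).length m0) ?_
    rw [pv_revfind_last
      (fun j => ((r0 :: rs).take (m0 :: ms).length).foldl max r0 ≤ (r0 :: rs)[j]?.getD 0)
      i (le_of_eq hri.symm) (m0 :: ms).length hiN
      (fun j hj1 hj2 h => absurd h (not_le_of_gt (hlastD j (List.mem_range.mpr hj2) hj1)))]
  rw [hA, hB]
  exact fun h => hmne h.symm
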